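-- pv_equiv track=rewrite | github.com/OsipEkb/TK_LK | vehicles/parameter_groups.py | get_parameter_group
-- ===== SOURCE A (Python) =====
-- PARAMETER_GROUPS = {
--     'speed_safety': {
--         'name': 'Скорость и безопасность',
--         'icon': 'fa-tachometer-alt',
--         'color': '#e74c3c',
--         'description': 'Показатели скорости и безопасности вождения',
--         'chart_types': ['line', 'bar', 'radar'],
--         'parameters': [
--             'MaxSpeed', 'AverageSpeed', 'SpeedLimitMax', 'OverspeedCount',
--             'DQRating', 'DQPoints', 'DQOverspeedPoints', 'DQExcessAccelPoints'
--         ]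
--     },
--     'engine_fuel': {
--         'name': 'Двигатель и топливо',
--         'icon': 'fa-gas-pump',
--         'color': '#2ecc71',
--         'description': 'Работа двигателя и расход топлива',
--         'chart_types': ['line', 'bar', 'area'],
--         'parameters': [
--             'Engine1Motohours', 'Engine1FuelConsum', 'Engine1FuelConsumMPer100km',
--             'Engine1FuelConsumM', 'Engine1FuelConsumP', 'Engine1MHOnParks'
--         ]
--     },
--     'trip_info': {
--         'name': 'Информация о поездках',
--         'icon': 'fa-route',
--         'color': '#3498db',
--         'description': 'Основные показатели поездок',
--         'chart_types': ['line', 'bar', 'pie'],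
--         'parameters': [
--             'TotalDistance', 'TotalDuration', 'MoveDuration', 'ParkDuration',
--             'ParkCount', 'FirstLocation', 'LastLocation'
--         ]
--     },
--     'vehicle_stats': {
--         'name': 'Статистика ТС',
--         'icon': 'fa-chart-bar',
--         'color': '#9b59b6',
--         'description': 'Общая статистика транспортных средств',
--         'chart_types': ['bar', 'pie', 'doughnut'],
--         'parameters': [
--             'TankMainFuelUpCount', 'TankMainFuelDnCount', 'TankMainFuelUpVol',
--             'TankMainFuelDnVol', 'TankMainFuelLevel'
--         ]
--     }
-- }
--
-- def get_parameter_group(param_name: str):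
--     """Получить группу параметра"""
--     for group_id, group_data in PARAMETER_GROUPS.items():
--         if param_name in group_data['parameters']:
--             return {
--                 'id': group_id,
--                 'name': group_data['name'],
--                 'icon': group_data['icon'],
--                 'color': group_data['color']
--             }
--     return None
-- ===== SOURCE B (Python) =====
-- # Two normalized lookup tables instead of scanning nested group data:
-- # a flat map param -> group id, and a small map group id -> display metadata.
-- GROUP_META = {
--     'speed_safety': {'name': 'Скорость и безопасность', 'icon': 'fa-tachometer-alt', 'color': '#e74c3c'},
--     'engine_fuel': {'name': 'Двигатель и топливо', 'icon': 'fa-gas-pump', 'color': '#2ecc71'},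
--     'trip_info': {'name': 'Информация о поездках', 'icon': 'fa-route', 'color': '#3498db'},
--     'vehicle_stats': {'name': 'Статистика ТС', 'icon': 'fa-chart-bar', 'color': '#9b59b6'},
-- }
--
-- PARAM_TO_GROUP = {
--     'MaxSpeed': 'speed_safety', 'AverageSpeed': 'speed_safety',
--     'SpeedLimitMax': 'speed_safety', 'OverspeedCount': 'speed_safety',
--     'DQRating': 'speed_safety', 'DQPoints': 'speed_safety',
--     'DQOverspeedPoints': 'speed_safety', 'DQExcessAccelPoints': 'speed_safety',
--     'Engine1Motohours': 'engine_fuel', 'Engine1FuelConsum': 'engine_fuel',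
--     'Engine1FuelConsumMPer100km': 'engine_fuel', 'Engine1FuelConsumM': 'engine_fuel',
--     'Engine1FuelConsumP': 'engine_fuel', 'Engine1MHOnParks': 'engine_fuel',
--     'TotalDistance': 'trip_info', 'TotalDuration': 'trip_info',
--     'MoveDuration': 'trip_info', 'ParkDuration': 'trip_info',
--     'ParkCount': 'trip_info', 'FirstLocation': 'trip_info',
--     'LastLocation': 'trip_info',
--     'TankMainFuelUpCount': 'vehicle_stats', 'TankMainFuelDnCount': 'vehicle_stats',
--     'TankMainFuelUpVol': 'vehicle_stats', 'TankMainFuelDnVol': 'vehicle_stats',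
--     'TankMainFuelLevel': 'vehicle_stats',
-- }
--
-- def get_parameter_group(param_name: str):
--     """Получить группу параметра"""
--     gid = PARAM_TO_GROUP.get(param_name)
--     if gid is None:
--         return None
--     meta = GROUP_META[gid]
--     return {'id': gid, 'name': meta['name'], 'icon': meta['icon'], 'color': meta['color']}
-- ===== Notes on version B (the rewrite author's own statement) =====
-- stated objective: idiomatic
-- what changed: Replaces the per-call scan over nested PARAMETER_GROUPS with two normalized module-level tables (a flat param->group-id dict and a group-id->metadata dict); the call is one dict .get plus one composing lookup instead of a loop with membership tests.
import Mathlib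
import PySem

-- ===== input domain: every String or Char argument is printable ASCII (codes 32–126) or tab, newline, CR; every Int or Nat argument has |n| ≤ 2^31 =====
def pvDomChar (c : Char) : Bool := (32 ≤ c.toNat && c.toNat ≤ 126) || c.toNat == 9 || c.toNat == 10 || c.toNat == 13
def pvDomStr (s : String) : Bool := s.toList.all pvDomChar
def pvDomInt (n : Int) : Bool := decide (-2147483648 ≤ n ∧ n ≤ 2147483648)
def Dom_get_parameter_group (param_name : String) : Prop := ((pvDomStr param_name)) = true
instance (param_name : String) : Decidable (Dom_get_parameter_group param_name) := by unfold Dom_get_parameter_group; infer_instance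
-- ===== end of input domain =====

-- One honest line: B replaces A's per-call scan over the nested group table with two
-- normalized precomputed tables (param -> group id, group id -> metadata); idiomatic.

-- ===== PORT A =====
-- The nested table of Source A, as (id, name, icon, color, parameters).
def pvGroupsA : List (String × String × String × String × List String) :=
  [("speed_safety", "Скорость и безопасность", "fa-tachometer-alt", "#e74c3c", ["MaxSpeed", "AverageSpeed", "SpeedLimitMax", "OverspeedCount", "DQRating", "DQPoints", "DQOverspeedPoints", "DQExcessAccelPoints"]),
   ("engine_fuel", "Двигатель и топливо", "fa-gas-pump", "#2ecc71", ["Engine1Motohours", "Engine1FuelConsum", "Engine1FuelConsumMPer100km", "Engine1FuelConsumM", "Engine1FuelConsumP", "Engine1MHOnParks"]),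
   ("trip_info", "Информация о поездках", "fa-route", "#3498db", ["TotalDistance", "TotalDuration", "MoveDuration", "ParkDuration", "ParkCount", "FirstLocation", "LastLocation"]),
   ("vehicle_stats", "Статистика ТС", "fa-chart-bar", "#9b59b6", ["TankMainFuelUpCount", "TankMainFuelDnCount", "TankMainFuelUpVol", "TankMainFuelDnVol", "TankMainFuelLevel"])]

-- literal port of A's loop: first group whose parameter list contains param_name
def pvScanA (param_name : String) : List (String × String × String × String × List String) → Option (List (String × String))
  | [] => none
  | (gid, name, icon, color, ps) :: rest =>
    if param_name ∈ ps then
      some [("id", gid), ("name", name), ("icon", icon), ("color", color)]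
    else pvScanA param_name rest

def get_parameter_group (param_name : String) : Option (List (String × String)) :=
  pvScanA param_name pvGroupsA

-- ===== PORT B =====
-- GROUP_META: group id -> (name, icon, color)
def pvGroupMeta : PySem.Dict String (String × String × String) :=
  PySem.Dict.mk
  [("speed_safety", "Скорость и безопасность", "fa-tachometer-alt", "#e74c3c"),
   ("engine_fuel", "Двигатель и топливо", "fa-gas-pump", "#2ecc71"),
   ("trip_info", "Информация о поездках", "fa-route", "#3498db"),
   ("vehicle_stats", "Статистика ТС", "fa-chart-bar", "#9b59b6")]

-- PARAM_TO_GROUP: flat map param name -> group id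
def pvParamToGroup : PySem.Dict String String :=
  PySem.Dict.mk
  [("MaxSpeed", "speed_safety"),
   ("AverageSpeed", "speed_safety"),
   ("SpeedLimitMax", "speed_safety"),
   ("OverspeedCount", "speed_safety"),
   ("DQRating", "speed_safety"),
   ("DQPoints", "speed_safety"),
   ("DQOverspeedPoints", "speed_safety"),
   ("DQExcessAccelPoints", "speed_safety"),
   ("Engine1Motohours", "engine_fuel"),
   ("Engine1FuelConsum", "engine_fuel"),
   ("Engine1FuelConsumMPer100km", "engine_fuel"),
   ("Engine1FuelConsumM", "engine_fuel"),
   ("Engine1FuelConsumP", "engine_fuel"),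
   ("Engine1MHOnParks", "engine_fuel"),
   ("TotalDistance", "trip_info"),
   ("TotalDuration", "trip_info"),
   ("MoveDuration", "trip_info"),
   ("ParkDuration", "trip_info"),
   ("ParkCount", "trip_info"),
   ("FirstLocation", "trip_info"),
   ("LastLocation", "trip_info"),
   ("TankMainFuelUpCount", "vehicle_stats"),
   ("TankMainFuelDnCount", "vehicle_stats"),
   ("TankMainFuelUpVol", "vehicle_stats"),
   ("TankMainFuelDnVol", "vehicle_stats"),
   ("TankMainFuelLevel", "vehicle_stats")]

-- GROUP_META[gid] ported via get?/map; the none branch is Python's KeyError, never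
-- reached since every group id in pvParamToGroup has a metadata entry.
def get_parameter_group_alt (param_name : String) : Option (List (String × String)) :=
  match pvParamToGroup.get? param_name with
  | none => none
  | some gid =>
    (pvGroupMeta.get? gid).map (fun m =>
      [("id", gid), ("name", m.1), ("icon", m.2.1), ("color", m.2.2)])

-- ===== PRECONDITION & SPEC =====
def Spec_get_parameter_group (param_name : String) (out : Option (List (String × String))) : Prop := out = get_parameter_group_alt param_name
instance (param_name : String) (out : Option (List (String × String))) : Decidable (Spec_get_parameter_group param_name out) := by unfold Spec_get_parameter_group; infer_instance

-- ===== CLAIM (what is proved, stated in full; the proofs are below) =====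
def Claim_equal_get_parameter_group : Prop := ∀ (param_name : String), Dom_get_parameter_group param_name → Spec_get_parameter_group param_name (get_parameter_group param_name)

-- ===== LEMMAS AND PROOFS =====

-- ===== VERDICT (by name: the statement is the Claim_ definition above) =====
theorem get_parameter_group_spec : Claim_equal_get_parameter_group := by
  intro param_name _
  unfold Spec_get_parameter_group
  by_cases h0 : param_name = "MaxSpeed"
  · subst h0; rfl
  by_cases h1 : param_name = "AverageSpeed"
  · subst h1; rfl
  by_cases h2 : param_name = "SpeedLimitMax"
  · subst h2; rfl
  by_cases h3 : param_name = "OverspeedCount"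
  · subst h3; rfl
  by_cases h4 : param_name = "DQRating"
  · subst h4; rfl
  by_cases h5 : param_name = "DQPoints"
  · subst h5; rfl
  by_cases h6 : param_name = "DQOverspeedPoints"
  · subst h6; rfl
  by_cases h7 : param_name = "DQExcessAccelPoints"
  · subst h7; rfl
  by_cases h8 : param_name = "Engine1Motohours"
  · subst h8; rfl
  by_cases h9 : param_name = "Engine1FuelConsum"
  · subst h9; rfl
  by_cases h10 : param_name = "Engine1FuelConsumMPer100km"
  · subst h10; rfl
  by_cases h11 : param_name = "Engine1FuelConsumM"
  · subst h11; rfl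
  by_cases h12 : param_name = "Engine1FuelConsumP"
  · subst h12; rfl
  by_cases h13 : param_name = "Engine1MHOnParks"
  · subst h13; rfl
  by_cases h14 : param_name = "TotalDistance"
  · subst h14; rfl
  by_cases h15 : param_name = "TotalDuration"
  · subst h15; rfl
  by_cases h16 : param_name = "MoveDuration"
  · subst h16; rfl
  by_cases h17 : param_name = "ParkDuration"
  · subst h17; rfl
  by_cases h18 : param_name = "ParkCount"
  · subst h18; rfl
  by_cases h19 : param_name = "FirstLocation"
  · subst h19; rfl
  by_cases h20 : param_name = "LastLocation"
  · subst h20; rfl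
  by_cases h21 : param_name = "TankMainFuelUpCount"
  · subst h21; rfl
  by_cases h22 : param_name = "TankMainFuelDnCount"
  · subst h22; rfl
  by_cases h23 : param_name = "TankMainFuelUpVol"
  · subst h23; rfl
  by_cases h24 : param_name = "TankMainFuelDnVol"
  · subst h24; rfl
  by_cases h25 : param_name = "TankMainFuelLevel"
  · subst h25; rfl
  -- param_name matches no known parameter: both sides are none
  simp [get_parameter_group, get_parameter_group_alt, pvScanA, pvGroupsA,
        pvParamToGroup, PySem.Dict.get?, List.find?, beq_eq_decide,
        Option.map, h0, h1, h2, h3, h4, h5, h6, h7, h8, h9, h10, h11, h12, h13, h14, h15, h16, h17, h18, h19, h20, h21, h22, h23, h24, h25, Ne.symm h0, Ne.symm h1, Ne.symm h2, Ne.symm h3, Ne.symm h4, Ne.symm h5, Ne.symm h6, Ne.symm h7, Ne.symm h8, Ne.symm h9, Ne.symm h10, Ne.symm h11, Ne.symm h12, Ne.symm h13, Ne.symm h14, Ne.symm h15, Ne.symm h16, Ne.symm h17, Ne.symm h18, Ne.symm h19, Ne.symm h20, Ne.symm h21, Ne.symm h22, Ne.symm h23, Ne.symm h24, Ne.symm 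h25]
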